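-- pv_equiv track=rewrite | github.com/lazare-rd/scraperBleauInfo | scrapping/scrapperBleauInfo_rep.py | concatenateTuples
-- ===== SOURCE A (Python) =====
-- def concatenateTuples(iteratorTuples):
--     mainDico = {}
--     for tup in iteratorTuples :
--         if tup[0] not in mainDico :
--             mainDico[tup[0]] = tup[1]
--         else :
--             mainDico[tup[0]] += tup[1]
--     return mainDico
-- ===== SOURCE B (Python) =====
-- def concatenateTuples(iteratorTuples):
--     # Two passes: gather values per key, then reduce each group by +.
--     # (A mutates its stored/first value lists via +=; B only builds new lists --
--     # the RETURN value is identical, the side effect on the input is not reproduced.)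
--     groups = {}
--     for key, value in iteratorTuples:
--         groups.setdefault(key, []).append(value)
--     result = {}
--     for key, chunks in groups.items():
--         acc = chunks[0]
--         for chunk in chunks[1:]:
--             acc = acc + chunk
--         result[key] = acc
--     return result
-- ===== Notes on version B (the rewrite author's own statement) =====
-- stated objective: alternative
-- what changed: Single conditional insert/append loop replaced by a gather-then-reduce decomposition: first pass groups every value list under its key, second pass concatenates each group.
import Mathlib
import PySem

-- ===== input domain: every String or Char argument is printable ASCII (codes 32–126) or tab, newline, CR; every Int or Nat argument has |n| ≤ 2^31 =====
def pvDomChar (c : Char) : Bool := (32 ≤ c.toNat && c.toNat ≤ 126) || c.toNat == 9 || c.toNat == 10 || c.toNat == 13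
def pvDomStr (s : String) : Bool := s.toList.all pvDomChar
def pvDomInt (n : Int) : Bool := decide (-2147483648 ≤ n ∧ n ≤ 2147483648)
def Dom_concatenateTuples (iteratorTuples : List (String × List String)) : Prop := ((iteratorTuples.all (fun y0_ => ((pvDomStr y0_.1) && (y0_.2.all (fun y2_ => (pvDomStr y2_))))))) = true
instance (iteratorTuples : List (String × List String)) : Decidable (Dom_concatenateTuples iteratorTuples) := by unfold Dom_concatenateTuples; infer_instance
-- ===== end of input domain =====

-- B replaces A's conditional insert-or-extend loop by a gather-then-reduce decomposition
-- (group all value lists per key, then concatenate each group); equivalence is about the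
-- RETURN value only: Python A mutates its stored value lists via +=, B builds fresh lists.

-- ===== PORT A =====
-- dict in insertion order = PySem.Dict; 'mainDico[k] += v' is 'modify k [] (· ++ v)'
-- (the key is present in that branch, so the [] default is never read).
def concatenateTuples (iteratorTuples : List (String × List String)) : List (String × List String) :=
  (iteratorTuples.foldl
    (fun d tup =>
      if d.contains tup.1 = false then d.insert tup.1 tup.2
      else d.modify tup.1 [] (· ++ tup.2))
    PySem.Dict.empty).items

-- ===== PORT B =====
-- 'acc = chunks[0]; for chunk in chunks[1:]: acc = acc + chunk'
def pvReduceAdd (chunks : List (List String)) : List String :=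
  match chunks with
  | [] => []
  | h :: t => t.foldl (· ++ ·) h

-- first pass: groups.setdefault(key, []).append(value); second pass: reduce each group
def concatenateTuples_alt (iteratorTuples : List (String × List String)) : List (String × List String) :=
  ((iteratorTuples.foldl
      (fun d tup => d.modify tup.1 [] (· ++ [tup.2]))
      PySem.Dict.empty).items).map
    (fun p => (p.1, pvReduceAdd p.2))

-- ===== PRECONDITION & SPEC =====
def Spec_concatenateTuples (iteratorTuples : List (String × List String)) (out : List (String × List String)) : Prop := out = concatenateTuples_alt iteratorTuples
instance (iteratorTuples : List (String × List String)) (out : List (String × List String)) : Decidable (Spec_concatenateTuples iteratorTuples out) := by unfold Spec_concatenateTuples; infer_instance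

-- ===== CLAIM (what is proved, stated in full; the proofs are below) =====
def Claim_equal_concatenateTuples : Prop := ∀ (iteratorTuples : List (String × List String)), Dom_concatenateTuples iteratorTuples → Spec_concatenateTuples iteratorTuples (concatenateTuples iteratorTuples)

-- ===== LEMMAS AND PROOFS =====

-- A's conditional step is exactly a 'modify': on an absent key, modify k [] (· ++ v)
-- inserts [] ++ v = v, which is A's 'insert' branch.
theorem pvStepA_eq_modify (d : PySem.Dict String (List String)) (tup : String × List String) :
    (if d.contains tup.1 = false then d.insert tup.1 tup.2
     else d.modify tup.1 [] (· ++ tup.2)) = d.modify tup.1 [] (· ++ tup.2) := by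
  by_cases h : d.contains tup.1 = false
  · simp [h, PySem.Dict.modify, PySem.Dict.getD_of_not_contains _ _ h]
  · simp [h]

theorem pvFoldA_eq (l : List (String × List String)) (d : PySem.Dict String (List String)) :
    l.foldl (fun d tup =>
      if d.contains tup.1 = false then d.insert tup.1 tup.2
      else d.modify tup.1 [] (· ++ tup.2)) d
    = l.foldl (fun d tup => d.modify tup.1 [] (· ++ tup.2)) d := by
  induction l generalizing d with
  | nil => rfl
  | cons p t ih => rw [List.foldl_cons, pvStepA_eq_modify]; exact ih _

-- value at key c of A's modify-fold: the concatenation of all values filed under c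
theorem pvGetD_foldA (l : List (String × List String)) (d : PySem.Dict String (List String)) (c : String) :
    (l.foldl (fun d tup => d.modify tup.1 [] (· ++ tup.2)) d).getD c []
      = d.getD c [] ++ ((l.filter (fun p => p.1 == c)).map (·.2)).flatten := by
  induction l generalizing d with
  | nil => simp
  | cons p t ih =>
    simp only [List.foldl_cons, ih, List.filter_cons]
    by_cases hc : p.1 = c
    · simp [hc]
    · have hc' : ¬ c = p.1 := fun h => hc h.symm
      simp [hc, hc', PySem.Dict.getD_modify]

theorem pvFoldl_append_eq_flatten (t : List (List String)) (a : List String) :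
    t.foldl (· ++ ·) a = a ++ t.flatten := by
  induction t generalizing a with
  | nil => simp
  | cons h t ih => simp [ih, List.append_assoc]

theorem pvReduceAdd_eq_flatten (vs : List (List String)) : pvReduceAdd vs = vs.flatten := by
  cases vs with
  | nil => rfl
  | cons h t => simp [pvReduceAdd, pvFoldl_append_eq_flatten]

-- ===== VERDICT (by name: the statement is the Claim_ definition above) =====
theorem concatenateTuples_spec : Claim_equal_concatenateTuples := by
  intro l _
  unfold Spec_concatenateTuples concatenateTuples concatenateTuples_alt
  rw [pvFoldA_eq]
  have hndA : (l.foldl (fun d tup => d.modify tup.1 [] (· ++ tup.2)) PySem.Dict.empty).keys.Nodup :=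
    PySem.Dict.nodup_keys_foldl_modify_key l (fun tup => tup.1) []
      (fun _ tup v => v ++ tup.2) PySem.Dict.empty PySem.Dict.nodup_keys_empty
  have hndG : (l.foldl (fun d tup => d.modify tup.1 [] (· ++ [tup.2])) PySem.Dict.empty).keys.Nodup :=
    PySem.Dict.nodup_keys_foldl_modify_key l (fun tup => tup.1) []
      (fun _ tup v => v ++ [tup.2]) PySem.Dict.empty PySem.Dict.nodup_keys_empty
  rw [PySem.Dict.items_eq_map_keys _ hndA [],
      PySem.Dict.items_eq_map_keys _ hndG []]
  rw [PySem.Dict.keys_foldl_modify_key l (fun tup => tup.1) [] (fun _ tup v => v ++ tup.2),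
      PySem.Dict.keys_foldl_modify_key l (fun tup => tup.1) [] (fun _ tup v => v ++ [tup.2])]
  rw [List.map_map]
  apply List.map_congr_left
  intro c _
  simp only [Function.comp]
  rw [pvGetD_foldA, PySem.Dict.getD_foldl_modify_append, pvReduceAdd_eq_flatten]
  simp
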